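-- pv_equiv track=rewrite | github.com/mohammadfaiizan/ProjectI | DSA/Problem/Queue_Stack/04_Deque_Double_Ended_Queue/1425_Constrained_Subsequence_Sum.py | constrainedSubsetSum_dp_brute_force
-- ===== SOURCE A (Python) =====
-- from typing import List, Deque
--
-- def constrainedSubsetSum_dp_brute_force(nums: List[int], k: int) -> int:
--     """
--     Approach 3: Dynamic Programming Brute Force
--
--     For each position, check all valid previous positions.
--
--     Time: O(n * k), Space: O(n)
--     """
--     n = len(nums)
--     dp = [float('-inf')] * n
--     dp[0] = nums[0]
--
--     for i in range(1, n):
--         # Option 1: Start new subsequence at i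
--         dp[i] = nums[i]
--
--         # Option 2: Extend from previous positions within k distance
--         for j in range(max(0, i - k), i):
--             if dp[j] > 0:  # Only extend if previous sum is positive
--                 dp[i] = max(dp[i], dp[j] + nums[i])
--
--     return max(dp)
-- ===== SOURCE B (Python) =====
-- from collections import deque
--
-- def constrainedSubsetSum_dp_brute_force(nums, k):
--     """Monotonic-deque sliding-window maximum over dp values: O(n) instead of O(n*k)."""
--     dq = deque()          # indices with strictly decreasing dp values
--     dp = [0] * len(nums)
--     best = None
--     for i, x in enumerate(nums):
--         while dq and dq[0] < i - k:
--             dq.popleft()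
--         cur = x + (dp[dq[0]] if dq and dp[dq[0]] > 0 else 0)
--         dp[i] = cur
--         while dq and dp[dq[-1]] <= cur:
--             dq.pop()
--         dq.append(i)
--         best = cur if best is None else max(best, cur)
--     return best
-- ===== Notes on version B (the rewrite author's own statement) =====
-- stated objective: faster
-- what changed: Replaced A's inner rescan of up to k previous dp values at every index by a monotonic deque that maintains the sliding-window maximum of dp, and the final max(dp) pass by a running best.
-- outside the precondition, e.g. on constrainedSubsetSum_dp_brute_force([], 0): A raises IndexError, B returns None
import Mathlib
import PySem

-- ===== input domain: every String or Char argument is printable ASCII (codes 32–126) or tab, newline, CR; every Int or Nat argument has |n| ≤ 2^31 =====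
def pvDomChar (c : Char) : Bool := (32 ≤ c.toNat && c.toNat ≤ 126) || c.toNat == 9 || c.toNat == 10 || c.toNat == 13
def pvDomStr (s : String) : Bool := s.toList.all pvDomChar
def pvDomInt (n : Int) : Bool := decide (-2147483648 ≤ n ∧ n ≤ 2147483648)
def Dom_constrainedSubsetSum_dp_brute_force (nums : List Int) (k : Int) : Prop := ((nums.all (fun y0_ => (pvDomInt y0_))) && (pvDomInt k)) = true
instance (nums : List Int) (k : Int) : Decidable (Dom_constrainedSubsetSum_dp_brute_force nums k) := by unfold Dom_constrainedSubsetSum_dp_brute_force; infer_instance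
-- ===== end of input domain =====

-- B replaces A's O(n*k) inner rescans by a monotonic-deque sliding-window maximum over the dp values.

-- ===== PORT A =====
-- aStep: one step of A's outer loop. dp is grown by appending dp[i]; A's float('-inf')
-- placeholders are never read (entry i is assigned before any read of it), so the growing
-- list holds exactly the values A's array holds at each read.
def aStep (nums : List Int) (k : Int) (dp : List Int) (i : Int) : List Int :=
  let xi := PySem.List.pyGetD nums i 0
  let v := (PySem.List.pyRange (max 0 (i - k)) i).foldl (fun acc j =>
    let dj := PySem.List.pyGetD dp j 0
    if dj > 0 then max acc (dj + xi) else acc) xi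
  dp ++ [v]

def constrainedSubsetSum_dp_brute_force (nums : List Int) (k : Int) : Int :=
  match nums with
  | [] => 0
  | x :: _ =>
    let n : Int := nums.length
    let dp := (PySem.List.pyRange 1 n).foldl (aStep nums k) [x]
    (PySem.List.max? dp (fun y => y)).getD 0

def frontVal (dp : List Int) (dq : List Int) : Int :=
  match dq.head? with
  | some j => let dj := PySem.List.pyGetD dp j 0; if dj > 0 then dj else 0
  | none => 0

def bestUpd (best : Option Int) (cur : Int) : Option Int :=
  some (match best with | some b => max b cur | none => cur)

def altStep (k : Int) (st : List Int × List Int × Option Int) (p : Int × Int) : List Int × List Int × Option Int :=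
  let dq := st.1; let dp := st.2.1; let best := st.2.2
  let i := p.1; let x := p.2
  let dq := dq.dropWhile (fun j => decide (j < i - k))
  let cur := x + frontVal dp dq
  let dp := dp ++ [cur]
  let dq := (dq.reverse.dropWhile (fun j => decide (PySem.List.pyGetD dp j 0 ≤ cur))).reverse
  let dq := dq ++ [i]
  let best := bestUpd best cur
  (dq, dp, best)

def constrainedSubsetSum_dp_brute_force_alt (nums : List Int) (k : Int) : Int :=
  let st := (PySem.List.enumerate nums).foldl (altStep k) ([], [], none)
  st.2.2.getD 0

-- ===== PRECONDITION & SPEC =====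
-- A raises IndexError (dp[0] = nums[0]) on the empty list; Pre_ excludes exactly that input.
def Pre_constrainedSubsetSum_dp_brute_force (nums : List Int) (k : Int) : Prop := nums ≠ []
instance (nums : List Int) (k : Int) : Decidable (Pre_constrainedSubsetSum_dp_brute_force nums k) := by
  unfold Pre_constrainedSubsetSum_dp_brute_force; infer_instance

def pvWitness_constrainedSubsetSum_dp_brute_force : List Int × Int := ([1, -2, 3], 2)

def Spec_constrainedSubsetSum_dp_brute_force (nums : List Int) (k : Int) (out : Int) : Prop := out = constrainedSubsetSum_dp_brute_force_alt nums k
instance (nums : List Int) (k : Int) (out : Int) : Decidable (Spec_constrainedSubsetSum_dp_brute_force nums k out) := by unfold Spec_constrainedSubsetSum_dp_brute_force; infer_instance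

-- ===== CLAIM (what is proved, stated in full; the proofs are below) =====
def Claim_equal_constrainedSubsetSum_dp_brute_force : Prop := ∀ (nums : List Int) (k : Int), Dom_constrainedSubsetSum_dp_brute_force nums k → Pre_constrainedSubsetSum_dp_brute_force nums k → Spec_constrainedSubsetSum_dp_brute_force nums k (constrainedSubsetSum_dp_brute_force nums k)

-- ===== LEMMAS AND PROOFS =====
-- Both ports are proved equal to a common reference: refDP builds A's dp prefix lists, and
-- the deque state of B is characterised as deqOf (the suffix-strict-maxima of dp in the window).

def refEntry (k x : Int) (dp : List Int) : Int :=
  x + (PySem.List.pyRange (max 0 ((dp.length : Int) - k)) (dp.length : Int)).foldl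
        (fun acc j => let dj := PySem.List.pyGetD dp j 0; if dj > 0 then max acc dj else acc) 0

def refDP (nums : List Int) (k : Int) : Nat → List Int
  | 0 => []
  | m+1 => refDP nums k m ++ [refEntry k (nums.getD m 0) (refDP nums k m)]

def bestOf (l : List Int) : Option Int :=
  match l with
  | [] => none
  | y :: ys => some (ys.foldl max y)

def sfxP (d : List Int) (j : Nat) : Bool :=
  decide (∀ j' ∈ List.range d.length, j < j' → d.getD j' 0 < d.getD j 0)

def deqOf (k : Int) (d : List Int) : List Int :=
  ((List.range d.length).filter
    (fun j => (decide (j + 1 = d.length) || decide ((d.length : Int) - 1 - k ≤ (j : Int))) && sfxP d j)).map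
    (fun j : Nat => (j : Int))

theorem refDP_length (nums : List Int) (k : Int) (m : Nat) : (refDP nums k m).length = m := by
  induction m with
  | zero => rfl
  | succ m ih => simp [refDP, ih]

theorem posfold_shift (dp : List Int) (x : Int) (R : List Int) : ∀ (a : Int),
    R.foldl (fun acc j =>
      if PySem.List.pyGetD dp j 0 > 0 then max acc (PySem.List.pyGetD dp j 0 + x) else acc) (x + a)
    = x + R.foldl (fun acc j =>
      if PySem.List.pyGetD dp j 0 > 0 then max acc (PySem.List.pyGetD dp j 0) else acc) a := by
  induction R with
  | nil => intro a; rfl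
  | cons j t ih =>
    intro a
    simp only [List.foldl_cons]
    by_cases h : PySem.List.pyGetD dp j 0 > 0
    · simp only [h, if_pos]
      have : max (x + a) (PySem.List.pyGetD dp j 0 + x) = x + max a (PySem.List.pyGetD dp j 0) := by
        omega
      rw [this, ih]
    · simp only [h, if_false]
      exact ih a

theorem posfold_init' (dp : List Int) (x : Int) (R : List Int) :
    R.foldl (fun acc j =>
      if PySem.List.pyGetD dp j 0 > 0 then max acc (PySem.List.pyGetD dp j 0 + x) else acc) x
    = x + R.foldl (fun acc j =>
      if PySem.List.pyGetD dp j 0 > 0 then max acc (PySem.List.pyGetD dp j 0) else acc) 0 := by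
  have h := posfold_shift dp x R 0
  simpa using h

theorem aStep_ref (nums : List Int) (k : Int) (m : Nat) (dp : List Int) (hd : dp.length = m + 1) :
    aStep nums k dp (1 + (m : Int)) = dp ++ [refEntry k (nums.getD (m + 1) 0) dp] := by
  have hc : (1 + (m : Int)) = ((m + 1 : Nat) : Int) := by push_cast; ring
  rw [hc]
  unfold aStep refEntry
  simp only [PySem.List.pyGetD_natCast, hd]
  rw [posfold_init']

theorem A_loop' (nums : List Int) (k : Int) (x : Int) (rest : List Int) (hx : nums = x :: rest) :
    ∀ m : Nat, (PySem.List.pyRange 1 (1 + (m : Int))).foldl (aStep nums k) [x] = refDP nums k (m + 1) := by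
  intro m
  induction m with
  | zero =>
    rw [show ((0:Nat) : Int) = 0 by rfl]
    rw [PySem.List.pyRange_one_eq_nil (by omega)]
    simp only [List.foldl_nil, refDP]
    have : nums.getD 0 0 = x := by rw [hx]; rfl
    rw [this]
    unfold refEntry
    rw [PySem.List.pyRange_one_eq_nil (by simp)]
    simp
  | succ m ih =>
    have hc : (1 + ((m+1 : Nat) : Int)) = (1 + (m : Int)) + 1 := by push_cast; ring
    rw [hc, PySem.List.pyRange_one_succ_right (by omega), List.foldl_append, ih]
    simp only [List.foldl_cons, List.foldl_nil]
    rw [aStep_ref nums k m _ (refDP_length nums k (m+1))]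
    rfl

theorem max?_eq_bestOf (l : List Int) : PySem.List.max? l (fun y => y) = bestOf l := by
  cases l with
  | nil => exact (PySem.List.max?_eq_none_iff _ _).mpr rfl
  | cons y ys => exact PySem.List.max?_id_cons y ys

theorem A_eq_ref (nums : List Int) (k : Int) (h : nums ≠ []) :
    constrainedSubsetSum_dp_brute_force nums k = (bestOf (refDP nums k nums.length)).getD 0 := by
  match nums, h with
  | x :: rest, _ =>
    unfold constrainedSubsetSum_dp_brute_force
    have hn : (((x :: rest).length : Nat) : Int) = 1 + (rest.length : Int) := by simp; ring
    simp only [hn]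
    rw [A_loop' (x :: rest) k x rest rfl rest.length, max?_eq_bestOf]
    simp

theorem getD_append_length (pre t : List Int) (y : Int) :
    (pre ++ y :: t).getD pre.length 0 = y := by
  induction pre with
  | nil => rfl
  | cons a p ih => simpa using ih


theorem rpop_filter (p : Int → Bool) : ∀ (l : List Int), l.Pairwise (fun a b => p a = true → p b = true) →
    (l.reverse.dropWhile p).reverse = l.filter (fun a => ! p a) := by
  intro l
  induction l with
  | nil => intro _; rfl
  | cons a t ih =>
    intro h
    rw [List.pairwise_cons] at h
    by_cases hpa : p a = true
    · have hall : ∀ x ∈ t.reverse ++ [a], p x = true := by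
        intro x hx
        rcases List.mem_append.mp hx with hx | hx
        · exact h.1 x (List.mem_reverse.mp hx) hpa
        · simp at hx; subst hx; exact hpa
      rw [List.reverse_cons, List.dropWhile_eq_nil_iff.mpr hall]
      simp only [List.reverse_nil, List.filter_cons, hpa, Bool.not_true, Bool.false_eq_true, if_false]
      rw [eq_comm, List.filter_eq_nil_iff]
      intro x hx
      simp [h.1 x hx hpa]
    · rw [List.reverse_cons, List.dropWhile_append]
      by_cases he : (t.reverse.dropWhile p).isEmpty = true
      · rw [if_pos he]
        have ht : t.filter (fun a => ! p a) = [] := by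
          rw [← ih h.2]
          rw [List.isEmpty_iff] at he
          simp [he]
        simp [List.dropWhile_cons, hpa, List.filter_cons, ht]
      · rw [if_neg he]
        simp only [List.reverse_append, List.reverse_cons, List.reverse_nil, List.nil_append,
          List.filter_cons, hpa, Bool.not_false, List.singleton_append, if_true]
        rw [ih h.2]

def poppedF (k : Int) (d : List Int) : List Nat :=
  (List.range d.length).filter (fun j => decide ((d.length : Int) - k ≤ (j : Int)) && sfxP d j)

theorem poppedF_pairwise_lt (k : Int) (d : List Int) : (poppedF k d).Pairwise (· < ·) :=
  List.Pairwise.filter _ List.pairwise_lt_range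

theorem mem_poppedF (k : Int) (d : List Int) (j : Nat) :
    j ∈ poppedF k d ↔ j < d.length ∧ (d.length : Int) - k ≤ (j : Int) ∧
      (∀ j' ∈ List.range d.length, j < j' → d.getD j' 0 < d.getD j 0) := by
  unfold poppedF sfxP
  simp [List.mem_filter, and_assoc]

theorem dropWhile_cast_lt_filter (b : Int) : ∀ (l : List Nat), l.Pairwise (· < ·) →
    l.dropWhile (fun (j : Nat) => decide ((j : Int) < b)) = l.filter (fun (j : Nat) => decide (b ≤ (j : Int))) := by
  intro l
  induction l with
  | nil => intro _; rfl
  | cons a t ih =>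
    intro h
    rw [List.pairwise_cons] at h
    by_cases hab : (a : Int) < b
    · have hba : ¬ (b ≤ (a : Int)) := by omega
      simp only [List.dropWhile_cons, List.filter_cons, hab, hba, decide_true, decide_false,
        if_true, Bool.false_eq_true, if_false]
      exact ih h.2
    · have hba : b ≤ (a : Int) := by omega
      simp only [List.dropWhile_cons, List.filter_cons, hab, hba, decide_true, decide_false,
        if_true, Bool.false_eq_true, if_false]
      congr 1
      rw [eq_comm, List.filter_eq_self]
      intro x hx
      have := h.1 x hx
      simp; omega

theorem popped_eq (k : Int) (d : List Int) :
    (deqOf k d).dropWhile (fun j => decide (j < (d.length : Int) - k))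
    = (poppedF k d).map (fun j : Nat => (j : Int)) := by
  unfold deqOf poppedF
  rw [List.dropWhile_map]
  congr 1
  simp only [Function.comp_def]
  rw [dropWhile_cast_lt_filter _ _ (List.Pairwise.filter _ List.pairwise_lt_range),
    List.filter_filter]
  apply List.filter_congr
  intro j hj
  rw [List.mem_range] at hj
  by_cases hs : sfxP d j = true
  · simp only [hs, Bool.and_true]
    by_cases hk : (d.length : Int) - k ≤ (j : Int)
    · have h2 : (d.length : Int) - 1 - k ≤ (j : Int) := by omega
      simp [hk, h2]
    · simp [hk]
  · simp only [Bool.not_eq_true] at hs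
    simp [hs]

theorem posplain (d : List Int) : ∀ (R : List Int) (a : Int), 0 ≤ a →
    R.foldl (fun acc j =>
      if PySem.List.pyGetD d j 0 > 0 then max acc (PySem.List.pyGetD d j 0) else acc) a
    = R.foldl (fun acc j => max acc (PySem.List.pyGetD d j 0)) a := by
  intro R
  induction R with
  | nil => intro a _; rfl
  | cons j t ih =>
    intro a ha
    simp only [List.foldl_cons]
    by_cases h : PySem.List.pyGetD d j 0 > 0
    · rw [if_pos h]; exact ih _ (by omega)
    · rw [if_neg h]
      have : max a (PySem.List.pyGetD d j 0) = a := by omega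
      rw [this]; exact ih _ ha

theorem foldl_max_le {β : Type} (f : β → Int) (M : Int) : ∀ (R : List β) (a : Int), a ≤ M →
    (∀ j ∈ R, f j ≤ M) → R.foldl (fun acc j => max acc (f j)) a ≤ M := by
  intro R
  induction R with
  | nil => intro a ha _; exact ha
  | cons j t ih =>
    intro a ha hall
    simp only [List.foldl_cons]
    exact ih _ (by have := hall j (by simp); omega) (fun x hx => hall x (by simp [hx]))

theorem exists_last_argmax (d : List Int) : ∀ (l : List Nat), l.Pairwise (· < ·) → l ≠ [] →
    ∃ j ∈ l, (∀ j' ∈ l, d.getD j' 0 ≤ d.getD j 0) ∧ (∀ j' ∈ l, j < j' → d.getD j' 0 < d.getD j 0) := by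
  intro l
  induction l with
  | nil => intro _ h; exact absurd rfl h
  | cons a t ih =>
    intro hsort _
    rw [List.pairwise_cons] at hsort
    cases t with
    | nil =>
      exact ⟨a, by simp, by simp, by simp⟩
    | cons b u =>
      obtain ⟨jt, hjt, hmax, hlast⟩ := ih hsort.2 (by simp)
      have hajt : a < jt := hsort.1 jt hjt
      by_cases hab : d.getD a 0 ≤ d.getD jt 0
      · refine ⟨jt, by simp [hjt], ?_, ?_⟩
        · intro j' hj'
          rcases List.mem_cons.mp hj' with rfl | hj'
          · exact hab
          · exact hmax j' hj'
        · intro j' hj' hlt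
          rcases List.mem_cons.mp hj' with rfl | hj'
          · omega
          · exact hlast j' hj' hlt
      · refine ⟨a, by simp, ?_, ?_⟩
        · intro j' hj'
          rcases List.mem_cons.mp hj' with rfl | hj'
          · exact le_refl _
          · have := hmax j' hj'; omega
        · intro j' hj' hlt
          rcases List.mem_cons.mp hj' with rfl | hj'
          · omega
          · have := hmax j' hj'; omega

theorem head_le_of_pairwise_lt {l : List Nat} (h : l.Pairwise (· < ·)) {a : Nat}
    (ha : l.head? = some a) : ∀ b ∈ l, a ≤ b := by
  cases l with
  | nil => simp at ha
  | cons x t =>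
    simp only [List.head?_cons, Option.some_inj] at ha
    subst ha
    intro b hb
    rcases List.mem_cons.mp hb with rfl | hb
    · exact le_refl _
    · exact Nat.le_of_lt ((List.pairwise_cons.mp h).1 b hb)

theorem getD_concat_self (d : List Int) (c : Int) : (d ++ [c]).getD d.length 0 = c := by
  simp [List.getD_eq_getElem?_getD, List.getElem?_concat_length]

theorem getD_concat_lt (d : List Int) (c : Int) (j : Nat) (hj : j < d.length) :
    (d ++ [c]).getD j 0 = d.getD j 0 :=
  List.getD_append d [c] 0 j hj

theorem winmax_eq (d : List Int) (k : Int) :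
    frontVal d ((poppedF k d).map (fun j : Nat => (j : Int)))
    = (PySem.List.pyRange (max 0 ((d.length : Int) - k)) (d.length : Int)).foldl
        (fun acc j => if PySem.List.pyGetD d j 0 > 0 then max acc (PySem.List.pyGetD d j 0) else acc) 0 := by
  unfold frontVal
  rw [posplain d _ 0 (le_refl 0)]
  by_cases hwin : (d.length : Int) ≤ max 0 ((d.length : Int) - k)
  · rw [PySem.List.pyRange_one_eq_nil hwin]
    have hF : poppedF k d = [] := by
      rw [poppedF, List.filter_eq_nil_iff]
      intro j hj
      rw [List.mem_range] at hj
      simp only [Bool.and_eq_true, decide_eq_true_eq, not_and]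
      intro hk _
      omega
    rw [hF]
    rfl
  · have hwin' : max 0 ((d.length : Int) - k) < (d.length : Int) := by omega
    set m := d.length with hm
    have hWn : ((List.range m).filter (fun (j : Nat) => decide ((m : Int) - k ≤ (j : Int)))) ≠ [] := by
      have hmem : m - 1 ∈ (List.range m).filter (fun (j : Nat) => decide ((m : Int) - k ≤ (j : Int))) := by
        rw [List.mem_filter, List.mem_range]
        constructor
        · omega
        · simp only [decide_eq_true_eq]
          have h1 : ((m - 1 : Nat) : Int) = (m : Int) - 1 := by omega
          omega
      exact List.ne_nil_of_mem hmem
    obtain ⟨js, hjsW, hmax, hlast⟩ := exists_last_argmax d _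
      (List.Pairwise.filter _ List.pairwise_lt_range) hWn
    have hjs_range : js < m ∧ (m : Int) - k ≤ (js : Int) := by
      rw [List.mem_filter, List.mem_range] at hjsW
      exact ⟨hjsW.1, by simpa using hjsW.2⟩
    have hjsF : js ∈ poppedF k d := by
      rw [mem_poppedF]
      refine ⟨hjs_range.1, hjs_range.2, ?_⟩
      intro j' hj' hlt
      refine hlast j' ?_ hlt
      rw [List.mem_filter]
      refine ⟨hj', ?_⟩
      simp only [decide_eq_true_eq]
      have : (js : Int) ≤ (j' : Int) := by exact_mod_cast Nat.le_of_lt hlt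
      omega
    cases hF : poppedF k d with
    | nil => rw [hF] at hjsF; simp at hjsF
    | cons j0 rest =>
      have hj0F : j0 ∈ poppedF k d := by rw [hF]; simp
      have hj0 := (mem_poppedF k d j0).mp hj0F
      have hj0min : ∀ b ∈ poppedF k d, j0 ≤ b := by
        intro b hb
        exact head_le_of_pairwise_lt (poppedF_pairwise_lt k d) (by rw [hF]; rfl) b hb
      have hj0js : j0 = js := by
        have h1 : j0 ≤ js := hj0min js hjsF
        rcases Nat.lt_or_ge j0 js with hlt | hge
        · exfalso
          have h2 : d.getD js 0 < d.getD j0 0 := hj0.2.2 js (by rw [List.mem_range]; exact hjs_range.1) hlt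
          have h3 : d.getD j0 0 ≤ d.getD js 0 := by
            refine hmax j0 ?_
            rw [List.mem_filter, List.mem_range]
            exact ⟨hj0.1, by simp only [decide_eq_true_eq]; exact hj0.2.1⟩
          omega
        · omega
      subst hj0js
      -- maximality over the window
      have hub : ∀ j ∈ PySem.List.pyRange (max 0 ((m : Int) - k)) (m : Int),
          PySem.List.pyGetD d j 0 ≤ d.getD j0 0 := by
        intro j hj
        rw [PySem.List.mem_pyRange_one] at hj
        have h0j : 0 ≤ j := le_trans (le_max_left 0 _) hj.1
        have hcast : j = ((j.toNat : Nat) : Int) := by omega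
        rw [hcast, PySem.List.pyGetD_natCast]
        refine hmax j.toNat ?_
        rw [List.mem_filter, List.mem_range]
        constructor
        · omega
        · simp only [decide_eq_true_eq]; omega
      have hj0mem : ((j0 : Nat) : Int) ∈ PySem.List.pyRange (max 0 ((m : Int) - k)) (m : Int) := by
        rw [PySem.List.mem_pyRange_one]
        constructor
        · have := hj0.2.1
          have : (0 : Int) ≤ (j0 : Int) := by exact_mod_cast Nat.zero_le j0
          omega
        · exact_mod_cast hj0.1
      have hfold : (PySem.List.pyRange (max 0 ((m : Int) - k)) (m : Int)).foldl
          (fun acc j => max acc (PySem.List.pyGetD d j 0)) 0 = max 0 (d.getD j0 0) := by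
        apply le_antisymm
        · refine foldl_max_le _ _ _ _ (le_max_left 0 _) ?_
          intro j hj
          exact le_trans (hub j hj) (le_max_right 0 _)
        · have hb := PySem.List.le_foldl_max_int (PySem.List.pyRange (max 0 ((m : Int) - k)) (m : Int))
            (fun j => PySem.List.pyGetD d j 0) 0
          have h1 := hb.1
          have h2 := hb.2 _ hj0mem
          rw [PySem.List.pyGetD_natCast] at h2
          omega
      rw [hfold]
      simp only [List.map_cons, List.head?_cons]
      rw [PySem.List.pyGetD_natCast]
      split_ifs <;> omega

theorem sfxP_append (d : List Int) (c : Int) (j : Nat) (hj : j < d.length) :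
    sfxP (d ++ [c]) j = (sfxP d j && decide (c < d.getD j 0)) := by
  unfold sfxP
  rw [Bool.eq_iff_iff]
  simp only [Bool.and_eq_true, decide_eq_true_eq, List.mem_range, List.length_append,
    List.length_cons, List.length_nil]
  constructor
  · intro h
    constructor
    · intro j' hj' hlt
      have := h j' (by omega) hlt
      rwa [getD_concat_lt d c j' hj', getD_concat_lt d c j hj] at this
    · have := h d.length (by omega) hj
      rwa [getD_concat_self, getD_concat_lt d c j hj] at this
  · intro ⟨h1, h2⟩ j' hj' hlt
    rcases Nat.lt_or_ge j' d.length with hlt' | hge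
    · rw [getD_concat_lt d c j' hlt', getD_concat_lt d c j hj]
      exact h1 j' hlt' hlt
    · have : j' = d.length := by omega
      subst this
      rwa [getD_concat_self, getD_concat_lt d c j hj]

theorem frontVal_eq (d : List Int) (k : Int) (y : Int) :
    y + frontVal d ((poppedF k d).map (fun j : Nat => (j : Int))) = refEntry k y d := by
  rw [winmax_eq d k]
  rfl

theorem bestUpd_bestOf (l : List Int) (c : Int) : bestUpd (bestOf l) c = bestOf (l ++ [c]) := by
  cases l with
  | nil => rfl
  | cons x has => simp [bestUpd, bestOf, List.foldl_append]

theorem deq_push (k : Int) (d : List Int) (c : Int) :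
    ((((poppedF k d).map (fun j : Nat => (j : Int))).reverse.dropWhile
        (fun j => decide (PySem.List.pyGetD (d ++ [c]) j 0 ≤ c))).reverse) ++ [(d.length : Int)]
    = deqOf k (d ++ [c]) := by
  have hpair : ((poppedF k d).map (fun j : Nat => (j : Int))).Pairwise
      (fun a b => (decide (PySem.List.pyGetD (d ++ [c]) a 0 ≤ c)) = true →
                  (decide (PySem.List.pyGetD (d ++ [c]) b 0 ≤ c)) = true) := by
    refine List.pairwise_map.mpr ?_
    have h1 := (List.Pairwise.and_mem.mp (poppedF_pairwise_lt k d))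
    refine h1.imp ?_
    rintro a b ⟨ha, hb, hab⟩
    rw [mem_poppedF] at ha hb
    simp only [decide_eq_true_eq, PySem.List.pyGetD_natCast]
    rw [List.getD_append _ _ 0 a (by omega), List.getD_append _ _ 0 b (by omega)]
    intro hle
    have := ha.2.2 b (by rw [List.mem_range]; exact hb.1) hab
    omega
  rw [rpop_filter _ _ hpair, List.filter_map]
  have hfront : List.filter ((fun j => !decide (PySem.List.pyGetD (d ++ [c]) j 0 ≤ c)) ∘ (fun j : Nat => (j : Int)))
      (poppedF k d) = (List.range d.length).filter
        (fun (j : Nat) => ((decide ((d.length : Int) - k ≤ (j : Int))) && sfxP d j) && decide (c < d.getD j 0)) := by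
    unfold poppedF
    rw [List.filter_filter]
    apply List.filter_congr
    intro j hj
    rw [List.mem_range] at hj
    simp only [Function.comp]
    rw [PySem.List.pyGetD_natCast, List.getD_append _ _ 0 j hj]
    have e : (!decide (d.getD j 0 ≤ c)) = decide (c < d.getD j 0) := by
      rw [← decide_not, decide_eq_decide]; omega
    rw [e, Bool.and_comm]
  rw [hfront]
  unfold deqOf
  have hlen : (d ++ [c]).length = d.length + 1 := by simp
  rw [hlen, List.range_succ, List.filter_append, List.map_append]
  congr 1
  · congr 1
    apply List.filter_congr
    intro j hj
    rw [List.mem_range] at hj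
    have e1 : decide (j + 1 = d.length + 1) = false := by
      simp only [decide_eq_false_iff_not]; omega
    have e2 : decide (((d.length + 1 : Nat) : Int) - 1 - k ≤ (j : Int))
        = decide ((d.length : Int) - k ≤ (j : Int)) := by
      rw [decide_eq_decide]; push_cast; omega
    rw [e1, e2, sfxP_append d c j hj]
    cases hA : decide ((d.length : Int) - k ≤ (j : Int)) <;>
      cases hB : sfxP d j <;> cases hC : decide (c < d.getD j 0) <;> rfl
  · have hc1 : decide (d.length + 1 = d.length + 1) = true := by simp
    have hc2 : sfxP (d ++ [c]) d.length = true := by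
      unfold sfxP
      simp only [decide_eq_true_eq, List.mem_range, hlen]
      intro j' hj' hlt
      omega
    simp [hc1, hc2]

theorem refDP_succ (nums : List Int) (k : Int) (m : Nat) :
    refDP nums k (m + 1) = refDP nums k m ++ [refEntry k (nums.getD m 0) (refDP nums k m)] := rfl

theorem B_step (nums : List Int) (k : Int) (m : Nat) (y : Int) (hy : nums.getD m 0 = y) :
    altStep k (deqOf k (refDP nums k m), refDP nums k m, bestOf (refDP nums k m)) ((m : Int), y)
    = (deqOf k (refDP nums k (m+1)), refDP nums k (m+1), bestOf (refDP nums k (m+1))) := by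
  have hm := refDP_length nums k m
  have hd' : refDP nums k (m+1) = refDP nums k m ++ [refEntry k y (refDP nums k m)] := by
    rw [refDP_succ, hy]
  have hmc : (m : Int) = ((refDP nums k m).length : Int) := by rw [hm]
  simp only [altStep]
  rw [hd']
  conv_lhs => rw [hmc]
  rw [popped_eq k (refDP nums k m), frontVal_eq, deq_push, bestUpd_bestOf]

theorem B_loop (nums : List Int) (k : Int) : ∀ (l pre : List Int), nums = pre ++ l →
    (PySem.List.enumerate l (pre.length : Int)).foldl (altStep k)
      (deqOf k (refDP nums k pre.length), refDP nums k pre.length, bestOf (refDP nums k pre.length))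
    = (deqOf k (refDP nums k nums.length), refDP nums k nums.length, bestOf (refDP nums k nums.length)) := by
  intro l
  induction l with
  | nil =>
    intro pre hpre
    rw [PySem.List.enumerate_nil, List.foldl_nil]
    have : nums.length = pre.length := by rw [hpre]; simp
    rw [this]
  | cons y t ih =>
    intro pre hpre
    rw [PySem.List.enumerate_cons, List.foldl_cons]
    have hy : nums.getD pre.length 0 = y := by rw [hpre]; exact getD_append_length pre t y
    rw [B_step nums k pre.length y hy]
    have hlen : (pre ++ [y]).length = pre.length + 1 := by simp
    have := ih (pre ++ [y]) (by rw [hpre]; simp)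
    rw [hlen] at this
    have hcast : ((pre.length : Int) + 1) = (((pre.length + 1 : Nat)) : Int) := by push_cast; ring
    rw [hcast]
    exact this

theorem B_eq_ref (nums : List Int) (k : Int) :
    constrainedSubsetSum_dp_brute_force_alt nums k = (bestOf (refDP nums k nums.length)).getD 0 := by
  unfold constrainedSubsetSum_dp_brute_force_alt
  have h0 : (deqOf k (refDP nums k 0), refDP nums k 0, bestOf (refDP nums k 0))
      = (([] : List Int), ([] : List Int), (none : Option Int)) := by
    simp [refDP, deqOf, bestOf]
  have := B_loop nums k nums ([]) (by simp)
  simp only [List.length_nil, Nat.cast_zero] at this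
  rw [h0] at this
  show (List.foldl (altStep k) ([], [], none) (PySem.List.enumerate nums)).2.2.getD 0 = _
  have he : PySem.List.enumerate nums = PySem.List.enumerate nums 0 := rfl
  rw [he, this]

-- ===== VERDICT (by name: the statement is the Claim_ definition above) =====
theorem constrainedSubsetSum_dp_brute_force_spec : Claim_equal_constrainedSubsetSum_dp_brute_force := by
  intro nums k _ hpre
  unfold Spec_constrainedSubsetSum_dp_brute_force
  rw [A_eq_ref nums k hpre, B_eq_ref nums k]
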